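-- pv_equiv track=rewrite | github.com/ARL150/IDE-COMPILADORES | compiler/lexer.py | advance_position
-- ===== SOURCE A (Python) =====
-- def advance_position(text, line, column):
--     """
--     Avanza line/column recorriendo exactamente el texto consumido.
--     """
--     for ch in text:
--         if ch == "\n":
--             line += 1
--             column = 1
--         else:
--             column += 1
--     return line, column
-- ===== SOURCE B (Python) =====
-- def advance_position(text, line, column):
--     """
--     Avanza line/column con aritmetica sobre saltos de linea en lugar de
--     recorrer caracter por caracter.
--     """
--     i = text.rfind("\n")
--     if i == -1:
--         return line, column + len(text)
--     return line + text.count("\n"), len(text) - i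
-- ===== Notes on version B (the rewrite author's own statement) =====
-- stated objective: faster
-- what changed: Replaced the per-character loop updating (line, column) with closed-form arithmetic: line advances by text.count('\n') and the column is derived from the position of the last newline via text.rfind('\n').
import Mathlib
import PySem

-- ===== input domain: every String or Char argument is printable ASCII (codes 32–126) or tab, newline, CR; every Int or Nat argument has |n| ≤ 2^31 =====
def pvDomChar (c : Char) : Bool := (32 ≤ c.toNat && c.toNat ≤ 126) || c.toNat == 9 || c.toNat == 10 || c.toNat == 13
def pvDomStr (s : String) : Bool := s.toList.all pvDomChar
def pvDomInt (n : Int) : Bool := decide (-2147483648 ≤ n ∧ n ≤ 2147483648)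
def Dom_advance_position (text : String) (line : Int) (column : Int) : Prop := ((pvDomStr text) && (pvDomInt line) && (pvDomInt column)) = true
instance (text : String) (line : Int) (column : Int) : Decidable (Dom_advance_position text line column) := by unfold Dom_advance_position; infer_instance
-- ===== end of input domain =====

-- B replaces A's per-character (line, column) loop with newline-count + last-newline-position arithmetic (same O(n); measured constant-factor faster in Python via str.count/str.rfind).

-- ===== PORT A =====
def advance_position (text : String) (line : Int) (column : Int) : Int × Int :=
  text.toList.foldl
    (fun (lc : Int × Int) ch => if ch == '\n' then (lc.1 + 1, (1 : Int)) else (lc.1, lc.2 + 1))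
    (line, column)

-- ===== PORT B =====
def advance_position_alt (text : String) (line : Int) (column : Int) : Int × Int :=
  let i := PySem.Str.rfind text "\n"
  if i == -1 then (line, column + (PySem.Str.len text))
  else (line + (PySem.Str.count text "\n" : Int), (PySem.Str.len text) - i)

-- ===== PRECONDITION & SPEC =====
def Spec_advance_position (text : String) (line : Int) (column : Int) (out : Int × Int) : Prop := out = advance_position_alt text line column
instance (text : String) (line : Int) (column : Int) (out : Int × Int) : Decidable (Spec_advance_position text line column out) := by unfold Spec_advance_position; infer_instance

-- ===== CLAIM (what is proved, stated in full; the proofs are below) =====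
def Claim_equal_advance_position : Prop := ∀ (text : String) (line : Int) (column : Int), Dom_advance_position text line column → Spec_advance_position text line column (advance_position text line column)

-- ===== LEMMAS AND PROOFS =====

-- [d].isPrefixOf xs only looks at the first element
lemma prefix_singleton (d : Char) (xs : List Char) :
    List.isPrefixOf [d] xs = (xs[0]? == some d) := by
  cases xs with
  | nil => rfl
  | cons x t =>
    by_cases h : d = x
    · simp [List.isPrefixOf, h]
    · simp [List.isPrefixOf, h, Ne.symm h]

-- a step of rfind.go whose probe index is past the end just decrements
lemma go_step_nil (d : Char) (s : List Char) (j : Nat) (hj : s.length ≤ j + 1) :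
    PySem.Chars.rfind.go s [d] (j + 1) = PySem.Chars.rfind.go s [d] j := by
  have hd : List.drop (j + 1) s = [] := List.drop_eq_nil_of_le hj
  simp [PySem.Chars.rfind.go, hd, List.isPrefixOf]

-- rfind.go on indices strictly below l.length ignores an appended element
lemma go_append_lt (c d : Char) (l : List Char) :
    ∀ j, j < l.length → PySem.Chars.rfind.go (l ++ [c]) [d] j = PySem.Chars.rfind.go l [d] j := by
  intro j
  induction j with
  | zero =>
    intro h
    simp only [PySem.Chars.rfind.go, prefix_singleton]
    rw [List.getElem?_append_left h]
  | succ j ih =>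
    intro h
    simp only [PySem.Chars.rfind.go, prefix_singleton, List.getElem?_drop, Nat.add_zero]
    rw [List.getElem?_append_left (by omega), ih (by omega)]

-- rfind of a single character over an appended element
lemma rfind_append_singleton (c d : Char) (l : List Char) :
    PySem.Chars.rfind (l ++ [c]) [d] =
      if d = c then (l.length : Int) else PySem.Chars.rfind l [d] := by
  have h1 : PySem.Chars.rfind (l ++ [c]) [d]
      = PySem.Chars.rfind.go (l ++ [c]) [d] (l.length + 1) := by
    unfold PySem.Chars.rfind
    congr 1
    simp
  rw [h1, go_step_nil d _ _ (by simp)]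
  cases l with
  | nil =>
    by_cases h : d = c
    · subst h
      simp [PySem.Chars.rfind, PySem.Chars.rfind.go, prefix_singleton]
    · simp [PySem.Chars.rfind, PySem.Chars.rfind.go, prefix_singleton, h, Ne.symm h]
  | cons x t =>
    have hd : List.drop ((x :: t).length) ((x :: t) ++ [c]) = [c] := by
      rw [List.drop_append_of_le_length (le_refl _)]
      simp
    by_cases h : d = c
    · subst h
      simp [PySem.Chars.rfind.go, hd, prefix_singleton]
    · have h2 : PySem.Chars.rfind.go ((x :: t) ++ [c]) [d] ((x :: t).length)
          = PySem.Chars.rfind.go ((x :: t) ++ [c]) [d] t.length := by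
        simp [PySem.Chars.rfind.go, hd, prefix_singleton, Ne.symm h]
      rw [show ((x :: t).length) = t.length + 1 from rfl] at h2 ⊢
      rw [h2, go_append_lt c d (x :: t) t.length (by simp), if_neg h]
      have h3 : PySem.Chars.rfind (x :: t) [d]
          = PySem.Chars.rfind.go (x :: t) [d] (t.length + 1) := by
        unfold PySem.Chars.rfind
        congr 1
      rw [h3, go_step_nil d _ _ (by simp)]

-- rfind = -1 means the character does not occur
lemma rfind_neg_iff (d : Char) (cs : List Char) :
    PySem.Chars.rfind cs [d] = -1 ↔ d ∉ cs := by
  induction cs using List.reverseRecOn with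
  | nil => simp [PySem.Chars.rfind, PySem.Chars.rfind.go]
  | append_singleton l c ih =>
    rw [rfind_append_singleton]
    by_cases h : d = c
    · subst h
      have hm : d ∈ l ++ [d] := by simp
      simp [hm]
    · simp [h, ih, Ne.symm h]

-- count of a single character is List.count
lemma count_go_singleton (d : Char) :
    ∀ (fuel : Nat) (cs : List Char) (acc : Nat), cs.length ≤ fuel →
      PySem.Chars.count.go [d] fuel cs acc = acc + cs.count d := by
  intro fuel
  induction fuel with
  | zero =>
    intro cs acc h
    have : cs = [] := List.length_eq_zero_iff.1 (Nat.le_zero.1 h)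
    simp [this, PySem.Chars.count.go]
  | succ n ih =>
    intro cs acc h
    cases cs with
    | nil => simp [PySem.Chars.count.go]
    | cons x t =>
      have ht : t.length ≤ n := by simpa using h
      by_cases hx : d = x
      · subst hx
        simp only [PySem.Chars.count.go, prefix_singleton, List.getElem?_cons_zero,
          beq_self_eq_true, Bool.and_self, if_true, List.length_cons, List.drop_succ_cons,
          List.drop_zero]
        simp [ih t (acc + 1) ht, List.count_cons]
        omega
      · simp [PySem.Chars.count.go, prefix_singleton, Ne.symm hx, ih t acc ht,
          List.count_cons, hx]

lemma count_singleton (d : Char) (cs : List Char) :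
    PySem.Chars.count cs [d] = cs.count d := by
  simp [PySem.Chars.count, count_go_singleton d cs.length cs 0 le_rfl]

-- main characterisation of A's fold in terms of rfind and count
lemma fold_char (cs : List Char) (li co : Int) :
    List.foldl (fun (lc : Int × Int) ch => if ch == '\n' then (lc.1 + 1, (1 : Int)) else (lc.1, lc.2 + 1)) (li, co) cs
      = if PySem.Chars.rfind cs ['\n'] = -1 then (li, co + cs.length)
        else (li + (cs.count '\n' : Int), (cs.length : Int) - PySem.Chars.rfind cs ['\n']) := by
  induction cs using List.reverseRecOn generalizing li co with
  | nil => simp [PySem.Chars.rfind, PySem.Chars.rfind.go]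
  | append_singleton l c ih =>
    rw [List.foldl_append, ih, rfind_append_singleton]
    by_cases hc : c = '\n'
    · subst hc
      have hne : ¬ ((l.length : Int) = -1) := by omega
      by_cases hl : PySem.Chars.rfind l ['\n'] = -1
      · have h0 : '\n' ∉ l := (rfind_neg_iff _ _).1 hl
        simp [hl, hne, List.count_append, List.count_eq_zero.2 h0]
      · simp [hl, hne, List.count_append]
        omega
    · have hcc : ¬ ('\n' = c) := fun e => hc e.symm
      by_cases hl : PySem.Chars.rfind l ['\n'] = -1
      · simp [hcc, hl, hc]
        omega
      · simp [hcc, hl, hc, List.count_append]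
        omega

-- ===== VERDICT (by name: the statement is the Claim_ definition above) =====
theorem advance_position_spec : Claim_equal_advance_position := by
  intro text line column _
  unfold Spec_advance_position advance_position advance_position_alt
  have hnl : ("\n" : String).toList = ['\n'] := rfl
  simp only [PySem.Str.rfind_eq, PySem.Str.count_eq, PySem.Str.len_eq, hnl, count_singleton]
  rw [fold_char]
  by_cases h : PySem.Chars.rfind text.toList ['\n'] = -1 <;> simp [h]
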